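-- pv_equiv track=rewrite | github.com/PeakProfileAnalysis/mompy | mompy.py | get_peak_data
-- ===== SOURCE A (Python) =====
-- def get_peak_data(x_values, y_values):
--     Y_min = min(y_values)
--     Y_max = max(y_values)
--     j = 0
--     for i, y in enumerate(y_values):
--         if y == Y_max:
--             j = i
--     X_0 = x_values[j]
--     return X_0, Y_min, Y_max
-- ===== SOURCE B (Python) =====
-- def get_peak_data(x_values, y_values):
--     cur_min = cur_max = y_values[0]
--     j = 0
--     for i, y in enumerate(y_values[1:], 1):
--         if y >= cur_max:
--             cur_max = y
--             j = i
--         elif y < cur_min: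
--             cur_min = y
--     return x_values[j], cur_min, cur_max
-- ===== Notes on version B (the rewrite author's own statement) =====
-- stated objective: alternative
-- what changed: A makes three passes (min, max, then a scan for the last index of the max); B fuses everything into one pass that maintains a running min, running max and the last index at which the running max was attained.
import Mathlib
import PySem

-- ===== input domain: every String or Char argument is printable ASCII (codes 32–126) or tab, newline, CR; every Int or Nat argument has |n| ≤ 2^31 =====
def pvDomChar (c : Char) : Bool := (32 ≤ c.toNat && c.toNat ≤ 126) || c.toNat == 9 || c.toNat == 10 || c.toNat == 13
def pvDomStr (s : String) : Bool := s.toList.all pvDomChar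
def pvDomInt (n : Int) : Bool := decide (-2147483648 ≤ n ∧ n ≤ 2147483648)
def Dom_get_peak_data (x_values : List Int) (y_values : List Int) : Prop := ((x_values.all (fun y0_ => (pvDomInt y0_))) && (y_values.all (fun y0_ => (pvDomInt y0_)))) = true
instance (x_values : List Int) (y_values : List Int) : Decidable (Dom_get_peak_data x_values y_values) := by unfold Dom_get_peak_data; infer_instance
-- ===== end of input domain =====

-- B fuses A's three passes (min, max, last-index-of-max scan) into one pass; objective: alternative (same O(n) cost).

-- ===== PORT A =====
def get_peak_data (x_values : List Int) (y_values : List Int) : Int × Int × Int :=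
  let ymin := (PySem.List.min? y_values (fun v => v)).getD 0   -- min() raises ValueError on []: excluded by Pre_
  let ymax := (PySem.List.max? y_values (fun v => v)).getD 0
  let j := (PySem.List.enumerate y_values 0).foldl (fun j p => if p.2 = ymax then p.1 else j) 0
  ((PySem.List.pyGet? x_values j).getD 0, ymin, ymax)         -- x_values[j] IndexError: excluded by Pre_

-- ===== PORT B =====
-- loop body of Source B's single pass: state (cur_min, cur_max, j), element (i, y)
def pvStepB (st : Int × Int × Int) (p : Int × Int) : Int × Int × Int :=
  if st.2.1 ≤ p.2 then (st.1, p.2, p.1)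
  else if p.2 < st.1 then (p.2, st.2.1, st.2.2)
  else st

def get_peak_data_alt (x_values : List Int) (y_values : List Int) : Int × Int × Int :=
  let h := (PySem.List.pyGet? y_values 0).getD 0              -- y_values[0] IndexError on []: excluded by Pre_
  let st := (PySem.List.enumerate (PySem.List.slice y_values (some 1) none) 1).foldl pvStepB (h, h, 0)
  ((PySem.List.pyGet? x_values st.2.2).getD 0, st.1, st.2.1)

-- ===== PRECONDITION & SPEC =====
-- Pre_: exactly where Python A returns: y_values nonempty (else min() raises ValueError) and the
-- last index at which y_values attains its maximum is a valid index of x_values (else IndexError).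
def Pre_get_peak_data (x_values : List Int) (y_values : List Int) : Prop :=
  ∃ i : Fin y_values.length, (i : Nat) < x_values.length ∧
    (∀ k : Fin y_values.length, y_values.get k ≤ y_values.get i) ∧
    (∀ k : Fin y_values.length, i < k → y_values.get k < y_values.get i)
instance (x_values : List Int) (y_values : List Int) : Decidable (Pre_get_peak_data x_values y_values) := by unfold Pre_get_peak_data; infer_instance

def pvWitness_get_peak_data : List Int × List Int := ([10, 20, 30], [1, 5, 2])

def Spec_get_peak_data (x_values : List Int) (y_values : List Int) (out : Int × Int × Int) : Prop := out = get_peak_data_alt x_values y_values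
instance (x_values : List Int) (y_values : List Int) (out : Int × Int × Int) : Decidable (Spec_get_peak_data x_values y_values out) := by unfold Spec_get_peak_data; infer_instance

-- ===== CLAIM (what is proved, stated in full; the proofs are below) =====
def Claim_equal_get_peak_data : Prop := ∀ (x_values : List Int) (y_values : List Int), Dom_get_peak_data x_values y_values → Pre_get_peak_data x_values y_values → Spec_get_peak_data x_values y_values (get_peak_data x_values y_values)

-- ===== LEMMAS AND PROOFS =====

-- B's running max equals the plain max fold, independently of the rest of the state.
theorem pvB_max (t : List Int) : ∀ (cmin cmax j i : Int),
    ((PySem.List.enumerate t i).foldl pvStepB (cmin, cmax, j)).2.1 = t.foldl max cmax := by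
  induction t with
  | nil => intro cmin cmax j i; simp [PySem.List.enumerate]
  | cons y t ih =>
    intro cmin cmax j i
    rw [PySem.List.enumerate_cons, List.foldl_cons, List.foldl_cons]
    by_cases h : cmax ≤ y
    · simp only [pvStepB, h, if_pos]
      rw [ih, max_eq_right h]
    · have hy : y < cmax := lt_of_not_ge h
      simp only [pvStepB, h, if_false]
      rw [max_eq_left (le_of_lt hy)]
      by_cases h2 : y < cmin
      · simp only [h2, if_pos]; exact ih _ _ _ _
      · simp only [h2, if_false]; exact ih _ _ _ _

-- B's running min equals the plain min fold, given the invariant cmin ≤ cmax.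
theorem pvB_min (t : List Int) : ∀ (cmin cmax j i : Int), cmin ≤ cmax →
    ((PySem.List.enumerate t i).foldl pvStepB (cmin, cmax, j)).1 = t.foldl min cmin := by
  induction t with
  | nil => intro cmin cmax j i _; simp [PySem.List.enumerate]
  | cons y t ih =>
    intro cmin cmax j i hle
    rw [PySem.List.enumerate_cons, List.foldl_cons, List.foldl_cons]
    by_cases h : cmax ≤ y
    · simp only [pvStepB, h, if_pos]
      rw [min_eq_left (le_trans hle h)]
      exact ih _ _ _ _ (le_trans hle h)
    · have hy : y < cmax := lt_of_not_ge h
      simp only [pvStepB, h, if_false]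
      by_cases h2 : y < cmin
      · simp only [h2, if_pos]
        rw [min_eq_right (le_of_lt h2)]
        exact ih _ _ _ _ (le_of_lt hy)
      · simp only [h2, if_false]
        rw [min_eq_left (le_of_not_gt h2)]
        exact ih _ _ _ _ hle

-- B's running last-max index equals A's "last index equal to the global max" fold;
-- the two starting indices must agree whenever the starting running max is already the global max.
theorem pvB_j (t : List Int) : ∀ (M cmin cmax j₁ j₂ i : Int),
    M = t.foldl max cmax → (M = cmax → j₁ = j₂) →
    ((PySem.List.enumerate t i).foldl pvStepB (cmin, cmax, j₁)).2.2
      = (PySem.List.enumerate t i).foldl (fun j p => if p.2 = M then p.1 else j) j₂ := by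
  induction t with
  | nil =>
    intro M cmin cmax j₁ j₂ i hM hj
    simp only [List.foldl_nil] at hM ⊢
    simp [PySem.List.enumerate, hj hM]
  | cons y t ih =>
    intro M cmin cmax j₁ j₂ i hM hj
    rw [PySem.List.enumerate_cons, List.foldl_cons, List.foldl_cons]
    have hMle : ∀ c : Int, c ≤ t.foldl max c := fun c => (PySem.List.le_foldl_max t c).1
    by_cases h : cmax ≤ y
    · simp only [pvStepB, h, if_pos]
      refine ih M cmin y i (if y = M then i else j₂) (i + 1) ?_ ?_
      · rw [hM, List.foldl_cons, max_eq_right h]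
      · intro hMy; simp [hMy.symm]
    · have hy : y < cmax := lt_of_not_ge h
      have hM' : M = t.foldl max cmax := by
        rw [hM, List.foldl_cons, max_eq_left (le_of_lt hy)]
      have hyne : y ≠ M := by
        intro he
        have : cmax ≤ M := le_trans (hMle cmax) (le_of_eq hM'.symm)
        omega
      simp only [pvStepB, h, if_false]
      by_cases h2 : y < cmin
      · simp only [h2, if_pos]
        refine ih M y cmax j₁ (if y = M then i else j₂) (i + 1) hM' ?_
        intro hMc; simp [hyne, hj hMc]
      · simp only [h2, if_false]
        refine ih M cmin cmax j₁ (if y = M then i else j₂) (i + 1) hM' ?_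
        intro hMc; simp [hyne, hj hMc]

-- ===== VERDICT (by name: the statement is the Claim_ definition above) =====
theorem get_peak_data_spec : Claim_equal_get_peak_data := by
  intro x_values y_values _ hpre
  obtain ⟨i, -, -, -⟩ := hpre
  unfold Spec_get_peak_data
  cases y_values with
  | nil => exact absurd i.2 (by simp)
  | cons h t =>
    unfold get_peak_data get_peak_data_alt
    rw [PySem.List.min?_id_cons, PySem.List.max?_id_cons, PySem.List.slice_from_one]
    simp only [Option.getD_some, PySem.List.pyGet?_zero_cons, List.tail_cons,
      PySem.List.enumerate_cons, List.foldl_cons]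
    rw [pvB_max t, pvB_min t h h 0 1 le_rfl,
      pvB_j t (t.foldl max h) h h 0 (if h = t.foldl max h then 0 else 0) 1 rfl (by intro _; split <;> rfl)]
    norm_num
    rfl
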